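-- pv_equiv track=rewrite | github.com/mmoctezuma/Decision-Sciences | ETL/etl_preprocess_and_summary.py | _max_consecutive_valid
-- ===== SOURCE A (Python) =====
-- def _max_consecutive_valid(years_sorted, mask_sorted):
--     # Devuelve la racha máxima consecutiva de años con dato (True) dentro del vector ordenado por año
--     max_run = run = 0
--     prev_year = None
--     for y, ok in zip(years_sorted, mask_sorted):
--         if not ok:
--             run = 0
--             prev_year = y
--             continue
--         if prev_year is None or y == prev_year + 1:
--             run += 1
--         else:
--             run = 1
--         max_run = max(max_run, run)
--         prev_year = y
--     return max_run
-- ===== SOURCE B (Python) =====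
-- def _max_consecutive_valid(years_sorted, mask_sorted):
--     # Segment zip(years, mask) into maximal valid spans, then scan each span
--     # for its longest stretch of +1-consecutive years; best over all spans.
--     pairs = list(zip(years_sorted, mask_sorted))
--     n = len(pairs)
--     best = 0
--     i = 0
--     while i < n:
--         if not pairs[i][1]:
--             i += 1
--             continue
--         j = i
--         while j < n and pairs[j][1]:
--             j += 1
--         seg = [y for y, _ in pairs[i:j]]
--         cur = 1
--         run = 1
--         for k in range(1, len(seg)):
--             cur = cur + 1 if seg[k] == seg[k - 1] + 1 else 1
--             if cur > run:
--                 run = cur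
--         if run > best:
--             best = run
--         i = j
--     return best
-- ===== Notes on version B (the rewrite author's own statement) =====
-- stated objective: alternative
-- what changed: Replaces A's single streaming counter with prev-year/None state by a two-level decomposition: first split zip(years, mask) into maximal valid segments, then scan each segment for its longest +1-consecutive stretch, keeping the best over segments.
import Mathlib
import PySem

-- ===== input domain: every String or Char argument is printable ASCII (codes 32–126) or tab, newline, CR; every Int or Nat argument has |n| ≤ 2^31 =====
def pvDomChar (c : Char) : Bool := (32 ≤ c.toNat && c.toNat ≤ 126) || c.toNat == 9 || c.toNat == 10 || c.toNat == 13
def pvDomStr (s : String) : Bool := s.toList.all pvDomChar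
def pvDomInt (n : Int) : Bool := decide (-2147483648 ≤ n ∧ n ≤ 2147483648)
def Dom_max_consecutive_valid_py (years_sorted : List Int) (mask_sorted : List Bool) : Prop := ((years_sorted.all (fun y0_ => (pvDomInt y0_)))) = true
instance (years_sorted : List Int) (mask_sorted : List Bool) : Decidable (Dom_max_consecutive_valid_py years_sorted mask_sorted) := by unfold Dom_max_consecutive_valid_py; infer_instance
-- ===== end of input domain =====

-- B replaces A's single streaming counter (with Optional prev-year state) by a two-level
-- decomposition: split into maximal valid segments, then scan each segment; same O(n) cost.


-- ===== PORT A =====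
-- one iteration of A's for-loop: state = (max_run, run, prev_year)
def pvStepA (s : Int × Int × Option Int) (p : Int × Bool) : Int × Int × Option Int :=
  let (max_run, run, prev_year) := s
  let (y, ok) := p
  if !ok then (max_run, 0, some y)
  else
    let run' :=
      match prev_year with
      | none => run + 1
      | some pv => if y = pv + 1 then run + 1 else 1
    (max max_run run', run', some y)

def max_consecutive_valid_py (years_sorted : List Int) (mask_sorted : List Bool) : Int :=
  ((List.zip years_sorted mask_sorted).foldl pvStepA (0, 0, none)).1

-- ===== PORT B =====
-- inner for-loop of Source B: scan a valid segment, carrying prev year, current and best run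
def pvSegMax (prev : Int) (cur run : Int) : List Int → Int
  | [] => run
  | y :: rest =>
    let cur' := if y = prev + 1 then cur + 1 else 1
    pvSegMax y cur' (max run cur') rest

-- Source B's inner while: peel the maximal leading valid span off the pair list
def pvSplitValid : List (Int × Bool) → List Int × List (Int × Bool)
  | [] => ([], [])
  | (y, ok) :: rest =>
    if ok then
      let p := pvSplitValid rest
      (y :: p.1, p.2)
    else ([], (y, ok) :: rest)

theorem pvSplitValid_snd_length : ∀ l : List (Int × Bool), (pvSplitValid l).2.length ≤ l.length
  | [] => Nat.le_refl _
  | (y, ok) :: rest => by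
    simp only [pvSplitValid]
    split
    · exact Nat.le_succ_of_le (pvSplitValid_snd_length rest)
    · exact Nat.le_refl _

-- Source B's outer while over the pair list, accumulating the best run
def pvGo (best : Int) : List (Int × Bool) → Int
  | [] => best
  | (y, ok) :: rest =>
    if !ok then pvGo best rest
    else
      let p := pvSplitValid rest
      pvGo (max best (pvSegMax y 1 1 p.1)) p.2
termination_by l => l.length
decreasing_by
  · simp
  · exact Nat.lt_succ_of_le (pvSplitValid_snd_length rest)

def max_consecutive_valid_py_alt (years_sorted : List Int) (mask_sorted : List Bool) : Int :=
  pvGo 0 (List.zip years_sorted mask_sorted)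

-- ===== PRECONDITION & SPEC =====
def Spec_max_consecutive_valid_py (years_sorted : List Int) (mask_sorted : List Bool) (out : Int) : Prop := out = max_consecutive_valid_py_alt years_sorted mask_sorted
instance (years_sorted : List Int) (mask_sorted : List Bool) (out : Int) : Decidable (Spec_max_consecutive_valid_py years_sorted mask_sorted out) := by unfold Spec_max_consecutive_valid_py; infer_instance

-- ===== CLAIM (what is proved, stated in full; the proofs are below) =====
def Claim_equal_max_consecutive_valid_py : Prop := ∀ (years_sorted : List Int) (mask_sorted : List Bool), Dom_max_consecutive_valid_py years_sorted mask_sorted → Spec_max_consecutive_valid_py years_sorted mask_sorted (max_consecutive_valid_py years_sorted mask_sorted)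

-- ===== LEMMAS AND PROOFS =====

-- pvSplitValid decomposes the list: the leading valid span (re-tagged true) ++ the rest
theorem pvSplitValid_append : ∀ l : List (Int × Bool),
    ((pvSplitValid l).1.map (fun y => (y, true))) ++ (pvSplitValid l).2 = l
  | [] => rfl
  | (y, ok) :: rest => by
    simp only [pvSplitValid]
    by_cases h : ok
    · simp [h, pvSplitValid_append rest]
    · simp [h]

-- the rest after the valid span is empty or starts with an invalid pair
theorem pvSplitValid_snd_shape : ∀ l : List (Int × Bool),
    (pvSplitValid l).2 = [] ∨ ∃ y r, (pvSplitValid l).2 = (y, false) :: r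
  | [] => Or.inl rfl
  | (y, ok) :: rest => by
    simp only [pvSplitValid]
    by_cases h : ok
    · simpa [h] using pvSplitValid_snd_shape rest
    · exact Or.inr ⟨y, rest, by simp [h]⟩

-- the accumulated best in pvSegMax distributes over max
theorem pvSegMax_max : ∀ (s : List Int) (p c a b : Int),
    pvSegMax p c (max a b) s = max a (pvSegMax p c b s)
  | [], _, _, _, _ => rfl
  | y :: rest, p, c, a, b => by
    simp only [pvSegMax]
    rw [max_assoc, pvSegMax_max rest]

-- A's fold across a valid segment computes pvSegMax in its first component
theorem foldA_seg : ∀ (s : List Int) (m c : Int) (p : Int),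
    ∃ c' p', (s.map (fun y => (y, true))).foldl pvStepA (m, c, some p)
      = (pvSegMax p c m s, c', some p')
  | [], m, c, p => ⟨c, p, rfl⟩
  | y :: rest, m, c, p => by
    simp only [List.map_cons, List.foldl_cons, pvStepA, pvSegMax]
    by_cases h : y = p + 1
    · simpa [h, max_comm] using foldA_seg rest (max m (c + 1)) (c + 1) y
    · simpa [h, max_comm] using foldA_seg rest (max m 1) 1 y

-- main invariant: after a reset (run = 0), A's fold equals pvGo, for ANY prev_year
theorem foldA_eq_pvGo (l : List (Int × Bool)) (m : Int) (prev : Option Int) :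
    (l.foldl pvStepA (m, 0, prev)).1 = pvGo m l := by
  match l with
  | [] => simp [pvGo]
  | (y, ok) :: rest =>
    by_cases hok : ok
    · -- valid head: run becomes 1 whatever prev is
      subst hok
      have hstep : pvStepA (m, 0, prev) (y, true) = (max m 1, 1, some y) := by
        cases prev with
        | none => simp [pvStepA]
        | some pv => by_cases h : y = pv + 1 <;> simp [pvStepA, h]
      have hsplit := pvSplitValid_append rest
      obtain ⟨c', p', hseg⟩ := foldA_seg (pvSplitValid rest).1 (max m 1) 1 y
      have hfold : rest.foldl pvStepA (max m 1, 1, some y)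
          = ((pvSplitValid rest).2.foldl pvStepA (pvSegMax y 1 (max m 1) (pvSplitValid rest).1, c', some p')) := by
        conv_lhs => rw [← hsplit]
        rw [List.foldl_append, hseg]
      have hdist : pvSegMax y 1 (max m 1) (pvSplitValid rest).1
          = max m (pvSegMax y 1 1 (pvSplitValid rest).1) := pvSegMax_max _ _ _ _ _
      have hgo : pvGo m ((y, true) :: rest)
          = pvGo (max m (pvSegMax y 1 1 (pvSplitValid rest).1)) (pvSplitValid rest).2 := by
        simp [pvGo]
      have hlen : (pvSplitValid rest).2.length ≤ rest.length := pvSplitValid_snd_length rest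
      rw [List.foldl_cons, hstep, hfold, hgo]
      rcases pvSplitValid_snd_shape rest with hnil | ⟨y', r', hr⟩
      · rw [hnil, List.foldl_nil, hdist]; simp [pvGo]
      · have hr'len : r'.length < rest.length + 1 := by
          have := hlen; rw [hr] at this; simp at this; omega
        rw [hr, List.foldl_cons]
        have hstep2 : pvStepA (pvSegMax y 1 (max m 1) (pvSplitValid rest).1, c', some p') (y', false)
            = (pvSegMax y 1 (max m 1) (pvSplitValid rest).1, 0, some y') := by simp [pvStepA]
        rw [hstep2, hdist, foldA_eq_pvGo r' _ (some y')]
        simp [pvGo]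
    · -- invalid head: both reset/skip
      have hok' : ok = false := by simpa using hok
      subst hok'
      rw [List.foldl_cons]
      have : pvStepA (m, 0, prev) (y, false) = (m, 0, some y) := by simp [pvStepA]
      rw [this, foldA_eq_pvGo rest m (some y)]
      simp [pvGo]
termination_by l.length
decreasing_by
  · simpa using hr'len
  · simp

-- ===== VERDICT (by name: the statement is the Claim_ definition above) =====
theorem max_consecutive_valid_py_spec : Claim_equal_max_consecutive_valid_py := by
  intro ys ms _
  unfold Spec_max_consecutive_valid_py max_consecutive_valid_py max_consecutive_valid_py_alt
  exact foldA_eq_pvGo _ 0 none
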